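-- pv_equiv track=rewrite | github.com/aharrim/qa-rag | src/qa_rag/router.py | extract_component
-- ===== SOURCE A (Python) =====
-- def extract_component(q: str, known_components: list[str]) -> str | None:
--     ql = (q or "").lower()
--
--     norm = [(c, str(c).strip().lower()) for c in known_components if str(c).strip()]
--     norm.sort(key=lambda x: len(x[1]), reverse=True)
--
--     for original, lc in norm:
--         if lc and lc in ql:
--             return str(original).strip()
--     return None
-- ===== SOURCE B (Python) =====
-- def extract_component(q: str, known_components: list[str]) -> str | None:
--     ql = (q or "").lower()
--     best, best_len = None, -1
--     for c in known_components:
--         s = str(c).strip()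
--         if len(s) > best_len and s and s.lower() in ql:
--             best, best_len = s, len(s)
--     return best
-- ===== Notes on version B (the rewrite author's own statement) =====
-- stated objective: faster
-- what changed: Replaced A's build-normalized-pairs, stable descending sort, then scan-for-first-hit by a single best-so-far pass over known_components with a strict length tie-break (first-seen longest match wins, matching the stable sort), running the substring test only when the candidate is longer than the current best.
import Mathlib
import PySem

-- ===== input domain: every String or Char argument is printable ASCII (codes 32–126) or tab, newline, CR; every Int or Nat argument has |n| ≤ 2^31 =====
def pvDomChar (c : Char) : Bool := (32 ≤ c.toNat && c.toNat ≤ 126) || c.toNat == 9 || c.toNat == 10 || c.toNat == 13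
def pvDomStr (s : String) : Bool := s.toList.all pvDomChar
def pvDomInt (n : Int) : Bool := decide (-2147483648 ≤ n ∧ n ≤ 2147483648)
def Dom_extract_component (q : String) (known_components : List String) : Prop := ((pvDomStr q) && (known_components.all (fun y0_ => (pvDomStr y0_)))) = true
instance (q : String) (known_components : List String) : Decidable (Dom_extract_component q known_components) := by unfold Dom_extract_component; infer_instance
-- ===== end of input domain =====

-- B replaces A's build-sort-scan pipeline by one best-so-far pass (no sort; the strict '>'
-- reproduces the stable sort's tie-breaking). Equivalence is about the return value only
-- (A sorts only a local list, so no observable mutation differs).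

-- ===== PORT A =====
-- '(q or "")' is q itself for a str argument (q = "" gives ""); 'str(c)' is c for a str element.
def extract_component (q : String) (known_components : List String) : Option String :=
  let ql := PySem.Str.lower q
  let norm := (known_components.filter (fun c => !(PySem.Str.strip c == ""))).map
      (fun c => (c, PySem.Str.lower (PySem.Str.strip c)))
  let sortedNorm := PySem.List.sorted norm (fun x => PySem.Str.len x.2) true
  (sortedNorm.find? (fun x => !(x.2 == "") && PySem.Str.isIn x.2 ql)).map
      (fun x => PySem.Str.strip x.1)

-- ===== PORT B =====
def extract_component_alt (q : String) (known_components : List String) : Option String :=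
  let ql := PySem.Str.lower q
  (known_components.foldl (fun (a : Option String × Int) c =>
      let s := PySem.Str.strip c
      if decide (a.2 < PySem.Str.len s) && !(s == "") && PySem.Str.isIn (PySem.Str.lower s) ql
      then (some s, PySem.Str.len s) else a)
    (none, -1)).1

-- ===== PRECONDITION & SPEC =====
def Spec_extract_component (q : String) (known_components : List String) (out : Option String) : Prop := out = extract_component_alt q known_components
instance (q : String) (known_components : List String) (out : Option String) : Decidable (Spec_extract_component q known_components out) := by unfold Spec_extract_component; infer_instance

-- ===== CLAIM (what is proved, stated in full; the proofs are below) =====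
def Claim_equal_extract_component : Prop := ∀ (q : String) (known_components : List String), Dom_extract_component q known_components → Spec_extract_component q known_components (extract_component q known_components)

-- ===== LEMMAS AND PROOFS =====

-- lower is length-preserving, hence preserves (non)emptiness and Str.len
theorem pv_len_lower (s : String) : PySem.Str.len (PySem.Str.lower s) = PySem.Str.len s := by
  simp [PySem.Str.len_eq, PySem.Str.toList_lower, PySem.Chars.lower]

theorem pv_lower_eq_empty (s : String) : (PySem.Str.lower s == "") = (s == "") := by
  have h1 : (PySem.Str.lower s = "") ↔ (s = "") := by
    constructor
    · intro h
      have := congrArg String.toList h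
      simpa [PySem.Str.toList_lower, PySem.Chars.lower] using this
    · intro h; subst h; decide
  by_cases h : s = ""
  · subst h; decide
  · simp [h1, h]

-- insertBy puts x at the head when x beats every element
theorem pv_insertBy_head {α : Type} (before : α → α → Bool) (x : α) (zs : List α)
    (h : ∀ z ∈ zs, before x z = true) :
    PySem.List.insertBy before x zs = x :: zs := by
  cases zs with
  | nil => rfl
  | cons z t => simp [PySem.List.insertBy, h z (by simp)]

-- filtering commutes with inserting into a descending-sorted list
theorem pv_filter_insertBy {α : Type} (key : α → Int) (p : α → Bool) (x : α) (ys : List α)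
    (hs : ys.Pairwise (fun a b => key b ≤ key a)) :
    (PySem.List.insertBy (fun a b => decide (key b < key a)) x ys).filter p
      = if p x then PySem.List.insertBy (fun a b => decide (key b < key a)) x (ys.filter p)
        else ys.filter p := by
  induction ys with
  | nil =>
    simp [PySem.List.insertBy, List.filter]
    by_cases hp : p x <;> simp [hp]
  | cons y t ih =>
    have hpw := (List.pairwise_cons.mp hs).1
    have ht := (List.pairwise_cons.mp hs).2
    by_cases hlt : key y < key x
    · -- x goes to the very front
      have hhead : ∀ z ∈ y :: t, (fun a b => decide (key b < key a)) x z = true := by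
        intro z hz
        rcases List.mem_cons.mp hz with h | h
        · subst h; simp [hlt]
        · simp; exact lt_of_le_of_lt (hpw z h) hlt
      rw [pv_insertBy_head _ _ _ hhead]
      by_cases hp : p x
      · have hhead' : ∀ z ∈ (y :: t).filter p, (fun a b => decide (key b < key a)) x z = true := by
          intro z hz; exact hhead z (List.mem_of_mem_filter hz)
        rw [pv_insertBy_head _ _ _ hhead']
        simp [hp, List.filter]
      · simp [hp, List.filter]
    · -- x goes behind y
      have : PySem.List.insertBy (fun a b => decide (key b < key a)) x (y :: t)
          = y :: PySem.List.insertBy (fun a b => decide (key b < key a)) x t := by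
        simp [PySem.List.insertBy, hlt]
      rw [this]
      by_cases hpy : p y
      · by_cases hp : p x
        · have : (y :: t).filter p = y :: t.filter p := by simp [List.filter, hpy]
          rw [this]
          have : PySem.List.insertBy (fun a b => decide (key b < key a)) x (y :: t.filter p)
              = y :: PySem.List.insertBy (fun a b => decide (key b < key a)) x (t.filter p) := by
            simp [PySem.List.insertBy, hlt]
          rw [this]
          simp [List.filter, hpy, hp, ih ht]
        · simp [List.filter, hpy, hp, ih ht]
      · by_cases hp : p x <;> simp [List.filter, hpy, hp, ih ht]

-- rev-sorting a list with one more element at the end = insert it into the rev-sorted list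
theorem pv_sorted_rev_append {α : Type} (key : α → Int) (l : List α) (x : α) :
    PySem.List.sorted (l ++ [x]) key true
      = PySem.List.insertBy (fun a b => decide (key b < key a)) x (PySem.List.sorted l key true) := by
  rw [PySem.List.sorted_rev_eq_foldl_insertBy, PySem.List.sorted_rev_eq_foldl_insertBy,
    List.foldl_append]
  rfl

-- stability: filter commutes with the reverse stable sort
theorem pv_sorted_filter {α : Type} (key : α → Int) (p : α → Bool) (l : List α) :
    (PySem.List.sorted l key true).filter p = PySem.List.sorted (l.filter p) key true := by
  induction l using List.reverseRecOn with
  | nil => rfl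
  | append_singleton l x ih =>
    rw [pv_sorted_rev_append, pv_filter_insertBy key p x _ (PySem.List.sorted_pairwise_rev l key),
      List.filter_append]
    by_cases hp : p x
    · simp only [if_pos, List.filter_cons, hp, List.filter_nil, ih]
      rw [pv_sorted_rev_append]
    · simp [hp, ih]

-- max? of one more element at the end
theorem pv_max?_append {α : Type} (key : α → Int) (m : List α) (x : α) :
    PySem.List.max? (m ++ [x]) key
      = match PySem.List.max? m key with
        | none => some x
        | some b => if key b < key x then some x else some b := by
  simp only [PySem.List.max?, List.foldl_append, List.foldl_cons, List.foldl_nil]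
  rfl

-- first element of the reverse-sorted list = Python max (first maximal element)
theorem pv_head_sorted_rev {α : Type} (key : α → Int) (m : List α) :
    (PySem.List.sorted m key true).head? = PySem.List.max? m key := by
  induction m using List.reverseRecOn with
  | nil => rfl
  | append_singleton m x ih =>
    rw [pv_sorted_rev_append, pv_max?_append, ← ih]
    cases h : PySem.List.sorted m key true with
    | nil => simp [PySem.List.insertBy]
    | cons z t =>
      by_cases hlt : key z < key x
      · simp [PySem.List.insertBy, hlt]
      · simp [PySem.List.insertBy, hlt]

-- core: first hit on the descending sort = first maximal match
theorem pv_find_sorted_eq_max {α : Type} (key : α → Int) (p : α → Bool) (l : List α) :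
    (PySem.List.sorted l key true).find? p = PySem.List.max? (l.filter p) key := by
  rw [← List.head?_filter, pv_sorted_filter, pv_head_sorted_rev]

-- max? over a mapped list
theorem pv_max?_map {α β : Type} (key : β → Int) (g : α → β) (m : List α) :
    PySem.List.max? (m.map g) key = (PySem.List.max? m (fun a => key (g a))).map g := by
  have h : ∀ (acc : Option α),
      (m.map g).foldl (fun acc x => match acc with
        | none => some x
        | some b => if key b < key x then some x else some b) (acc.map g)
      = (m.foldl (fun acc x => match acc with
        | none => some x
        | some b => if key (g b) < key (g x) then some x else some b) acc).map g := by
    induction m with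
    | nil => intro acc; rfl
    | cons a t ih =>
      intro acc
      cases acc with
      | none => simpa using ih (some a)
      | some b =>
        simp only [List.map_cons, List.foldl_cons, Option.map_some]
        by_cases hlt : key (g b) < key (g a)
        · simpa [hlt] using ih (some a)
        · simpa [hlt] using ih (some b)
  simpa [PySem.List.max?] using h none

-- B's best-so-far loop computes max(key=len) of the stripped matches (first maximal wins)
theorem pv_fold_max (ql : String) (l : List String) :
    ∀ (acc : Option String) (k : Int),
      ((acc = none ∧ k = -1) ∨ (∃ s, acc = some s ∧ k = PySem.Str.len s)) →
      (l.foldl (fun (a : Option String × Int) c =>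
          let s := PySem.Str.strip c
          if decide (a.2 < PySem.Str.len s) && !(s == "") && PySem.Str.isIn (PySem.Str.lower s) ql
          then (some s, PySem.Str.len s) else a) (acc, k)).1
        = (l.filter (fun c => !(PySem.Str.strip c == "")
              && PySem.Str.isIn (PySem.Str.lower (PySem.Str.strip c)) ql)).foldl
            (fun (a : Option String) c => match a with
              | none => some (PySem.Str.strip c)
              | some m => if PySem.Str.len m < PySem.Str.len (PySem.Str.strip c)
                          then some (PySem.Str.strip c) else some m) acc := by
  induction l with
  | nil => intro acc k _; rfl
  | cons c t ih =>
    intro acc k hg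
    have hlen0 : (0 : Int) ≤ PySem.Str.len (PySem.Str.strip c) := by
      rw [PySem.Str.len_eq]; positivity
    by_cases hp : (!(PySem.Str.strip c == "")
        && PySem.Str.isIn (PySem.Str.lower (PySem.Str.strip c)) ql) = true
    · rcases hg with ⟨hn, hk⟩ | ⟨b, hb, hk⟩
      · subst hn; subst hk
        have hlt : (-1 : Int) < PySem.Str.len (PySem.Str.strip c) := by omega
        simp only [List.foldl_cons, List.filter_cons, hp, if_pos, hlt, decide_true,
          Bool.true_and, hp, Bool.and_true]
        exact ih (some (PySem.Str.strip c)) _ (Or.inr ⟨_, rfl, rfl⟩)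
      · subst hb; subst hk
        by_cases hlt : PySem.Str.len b < PySem.Str.len (PySem.Str.strip c)
        · simp only [List.foldl_cons, List.filter_cons, hp, if_pos, hlt, decide_true,
            Bool.true_and, Bool.and_true]
          exact ih (some (PySem.Str.strip c)) _ (Or.inr ⟨_, rfl, rfl⟩)
        · simp only [List.foldl_cons, List.filter_cons, hp, if_pos, hlt, decide_false,
            Bool.false_and, Bool.and_true, if_neg, if_false, Bool.false_eq_true,
            not_false_eq_true]
          simpa [hlt] using ih (some b) _ (Or.inr ⟨_, rfl, rfl⟩)
    · have hstep : (decide (k < PySem.Str.len (PySem.Str.strip c)) && !(PySem.Str.strip c == "")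
          && PySem.Str.isIn (PySem.Str.lower (PySem.Str.strip c)) ql) = false := by
        rcases Bool.and_eq_false_iff.mp (Bool.eq_false_iff.mpr hp) with h | h
        · simp only [h, Bool.and_false, Bool.false_and]
        · simp only [h, Bool.and_false, Bool.false_and]
      simp only [List.foldl_cons, List.filter_cons, hp, hstep]
      simp only [Bool.false_eq_true, if_false]
      exact ih acc k hg

-- hence B is max(key=len) over the stripped matches
theorem pv_alt_eq_max (q : String) (kcs : List String) :
    extract_component_alt q kcs
      = PySem.List.max?
          ((kcs.filter (fun c => !(PySem.Str.strip c == "")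
              && PySem.Str.isIn (PySem.Str.lower (PySem.Str.strip c)) (PySem.Str.lower q))).map
            (fun c => PySem.Str.strip c))
          (fun s => PySem.Str.len s) := by
  unfold extract_component_alt
  rw [pv_fold_max (PySem.Str.lower q) kcs none (-1) (Or.inl ⟨rfl, rfl⟩)]
  rw [PySem.List.max?, List.foldl_map]
  congr 1
  funext a c
  cases a <;> rfl

-- ===== VERDICT (by name: the statement is the Claim_ definition above) =====
theorem extract_component_spec : Claim_equal_extract_component := by
  intro q kcs _
  unfold Spec_extract_component extract_component
  simp only []
  rw [pv_find_sorted_eq_max]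
  rw [List.filter_map, List.filter_filter]
  have hfil : List.filter
      (fun c => ((fun x : String × String => !(x.2 == "") && PySem.Str.isIn x.2 (PySem.Str.lower q))
          ∘ (fun c => (c, PySem.Str.lower (PySem.Str.strip c)))) c
        && !(PySem.Str.strip c == "")) kcs
      = List.filter (fun c => !(PySem.Str.strip c == "")
          && PySem.Str.isIn (PySem.Str.lower (PySem.Str.strip c)) (PySem.Str.lower q)) kcs := by
    apply List.filter_congr
    intro c _
    simp only [Function.comp]
    rw [pv_lower_eq_empty]
    by_cases h : PySem.Str.strip c == "" <;> simp [h]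
  rw [hfil, pv_max?_map, pv_alt_eq_max, pv_max?_map, Option.map_map]
  have hkey : (fun a => PySem.Str.len ((fun c => (c, PySem.Str.lower (PySem.Str.strip c))) a).2)
      = (fun a => PySem.Str.len (PySem.Str.strip a)) := by
    funext a; exact pv_len_lower _
  rw [hkey]
  rfl
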